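-- pv_equiv track=rewrite | github.com/Gemolo/Teoria-Python | Progetti/Tris/tris.py | simboli
-- ===== SOURCE A (Python) =====
-- def simboli(vettore):
--     count = 0
--     for i in range(len(vettore)):
--         if vettore[i] == "X":
--             count += 1
--
--         if vettore[i] == "O":
--             count += -1
--
--         if vettore[i] == "-":
--             count += 0
--     return count
-- ===== SOURCE B (Python) =====
-- def simboli(vettore):
--     def go(lo, hi):
--         if hi - lo == 0:
--             return 0
--         if hi - lo == 1:
--             s = vettore[lo]
--             if s == "X":
--                 return 1
--             if s == "O":
--                 return -1
--             return 0
--         mid = (lo + hi) // 2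
--         return go(lo, mid) + go(mid, hi)
--     return go(0, len(vettore))
-- ===== Notes on version B (the rewrite author's own statement) =====
-- stated objective: alternative
-- what changed: Replaced A's single left-to-right accumulator loop with per-element branching by a divide-and-conquer recursion that splits the index interval at its midpoint and adds the scores of the two halves.
import Mathlib
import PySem

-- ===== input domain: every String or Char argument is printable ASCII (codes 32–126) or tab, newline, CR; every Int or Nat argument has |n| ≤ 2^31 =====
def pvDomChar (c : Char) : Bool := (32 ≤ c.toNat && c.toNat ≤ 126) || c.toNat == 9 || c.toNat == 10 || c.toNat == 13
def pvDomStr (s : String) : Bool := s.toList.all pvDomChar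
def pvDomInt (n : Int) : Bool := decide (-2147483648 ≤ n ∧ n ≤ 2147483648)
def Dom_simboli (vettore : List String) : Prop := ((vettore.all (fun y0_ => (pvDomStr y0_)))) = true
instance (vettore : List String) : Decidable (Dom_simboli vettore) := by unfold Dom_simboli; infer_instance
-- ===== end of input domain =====

-- B replaces A's left-to-right accumulator loop by a divide-and-conquer recursion on the
-- index interval (alternative decomposition, same O(n) cost).

-- ===== PORT A =====
-- literal port: for i in range(len(vettore)) with vettore[i]; the index is always in
-- range, so pyGetD with a dummy default is exact here
def simboliStep (count : Int) (v : String) : Int :=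
  let count := if v = "X" then count + 1 else count
  let count := if v = "O" then count + (-1) else count
  let count := if v = "-" then count + 0 else count
  count

def simboli (vettore : List String) : Int :=
  (PySem.List.pyRange 0 (PySem.List.len vettore) 1).foldl
    (fun count i => simboliStep count (PySem.List.pyGetD vettore i "")) 0

-- ===== PORT B =====
-- go(lo, hi) of Source B. Python tests 'hi - lo == 0'; the port tests 'hi - lo ≤ 0', which is
-- equal on every reachable call (0 ≤ lo ≤ hi always holds) and makes the recursion total.
def simboliGo (v : List String) (lo hi : Int) : Int :=
  if hi - lo ≤ 0 then 0
  else if hi - lo = 1 then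
    let s := PySem.List.pyGetD v lo ""
    if s = "X" then 1 else if s = "O" then -1 else 0
  else
    simboliGo v lo (PySem.Int.floordiv (lo + hi) 2) +
      simboliGo v (PySem.Int.floordiv (lo + hi) 2) hi
termination_by (hi - lo).toNat
decreasing_by
  · have hm : PySem.Int.floordiv (lo + hi) 2 = (lo + hi) / 2 :=
      PySem.Int.floordiv_eq_ediv_of_pos (by omega)
    rw [hm]; omega
  · have hm : PySem.Int.floordiv (lo + hi) 2 = (lo + hi) / 2 :=
      PySem.Int.floordiv_eq_ediv_of_pos (by omega)
    rw [hm]; omega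

def simboli_alt (vettore : List String) : Int :=
  simboliGo vettore 0 (PySem.List.len vettore)

-- ===== PRECONDITION & SPEC =====
def Spec_simboli (vettore : List String) (out : Int) : Prop := out = simboli_alt vettore
instance (vettore : List String) (out : Int) : Decidable (Spec_simboli vettore out) := by unfold Spec_simboli; infer_instance

-- ===== CLAIM (what is proved, stated in full; the proofs are below) =====
def Claim_equal_simboli : Prop := ∀ (vettore : List String), Dom_simboli vettore → Spec_simboli vettore (simboli vettore)

-- ===== LEMMAS AND PROOFS =====

-- the per-element score both programs effectively compute
def simboliVal (s : String) : Int := if s = "X" then 1 else if s = "O" then -1 else 0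

theorem simboliStep_val (c : Int) (s : String) : simboliStep c s = c + simboliVal s := by
  unfold simboliStep simboliVal
  by_cases hx : s = "X" <;> by_cases ho : s = "O" <;> simp [hx, ho]

theorem simboli_foldl (vettore : List String) (c : Int) :
    vettore.foldl simboliStep c = c + ((vettore.map simboliVal).sum) := by
  induction vettore generalizing c with
  | nil => simp
  | cons h t ih => simp [simboliStep_val, ih, add_assoc]

-- characterisation of the divide-and-conquer helper: it sums the scores of the slice [lo, hi)
theorem simboliGo_eq (v : List String) (lo hi : Int)
    (h0 : 0 ≤ lo) (h1 : lo ≤ hi) (h2 : hi ≤ (v.length : Int)) :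
    simboliGo v lo hi = (((v.drop lo.toNat).take (hi - lo).toNat).map simboliVal).sum := by
  generalize hn : (hi - lo).toNat = n
  induction n using Nat.strong_induction_on generalizing lo hi with
  | _ n ih =>
    rw [simboliGo]
    by_cases hz : hi - lo ≤ 0
    · have : n = 0 := by omega
      simp [hz, this]
    · by_cases hone : hi - lo = 1
      · have hlt : lo.toNat < v.length := by omega
        have hdrop : v.drop lo.toNat = v[lo.toNat] :: v.drop (lo.toNat + 1) :=
          (List.getElem_cons_drop hlt).symm
        have hget : PySem.List.pyGetD v lo "" = v[lo.toNat] :=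
          PySem.List.pyGetD_eq_getElem v "" h0 (by omega)
        have hn1 : n = 1 := by omega
        subst hn1
        have htake : List.take 1 (List.drop lo.toNat v) = [v[lo.toNat]] := by rw [hdrop]; rfl
        rw [if_neg hz, if_pos hone, htake, hget]
        simp [simboliVal]
      · have hm : PySem.Int.floordiv (lo + hi) 2 = (lo + hi) / 2 :=
          PySem.Int.floordiv_eq_ediv_of_pos (by omega)
        simp only [hz, if_false, hone, if_false, hm]
        set mid := (lo + hi) / 2 with hmid
        have hb1 : lo < mid := by omega
        have hb2 : mid < hi := by omega
        have e1 := ih (mid - lo).toNat (by omega) lo mid h0 (by omega) (by omega) rfl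
        have e2 := ih (hi - mid).toNat (by omega) mid hi (by omega) (by omega) h2 rfl
        rw [e1, e2]
        have hsplit : n = (mid - lo).toNat + (hi - mid).toNat := by omega
        rw [hsplit, List.take_add, List.map_append, List.sum_append, List.drop_drop]
        have : lo.toNat + (mid - lo).toNat = mid.toNat := by omega
        rw [this]

-- ===== VERDICT (by name: the statement is the Claim_ definition above) =====
theorem simboli_spec : Claim_equal_simboli := by
  intro vettore _
  unfold Spec_simboli simboli simboli_alt
  rw [PySem.List.foldl_pyRange_zero_pyGetD vettore "" simboliStep 0, simboli_foldl]
  rw [PySem.List.len_eq, simboliGo_eq vettore 0 (vettore.length : Int) le_rfl (by positivity) le_rfl]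
  simp
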